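-- pv_equiv track=rewrite | github.com/mschnitzer/ark-survival-ascended-linux-container-image | root/usr/share/asa-ctrl/asa_ctrl/config.py | parse_start_param
-- ===== SOURCE A (Python) =====
-- from typing import Optional
--
-- def parse_start_param(start_params: str, key: str) -> Optional[str]:
--     """
--     Extract a value from ASA start parameters string.
--
--     Start parameters format: "?key1=value1?key2=value2 -key3=value3"
--
--     Args:
--         start_params: The start parameters string
--         key: The parameter key to search for
--
--     Returns:
--         The parameter value if found, None otherwise
--
--     Examples:
--         >>> parse_start_param("?Port=7777?RCONPort=27020", "RCONPort")
--         '27020'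
--         >>> parse_start_param("-WinLiveMaxPlayers=50", "WinLiveMaxPlayers")
--         '50'
--     """
--     if not start_params:
--         return None
--
--     # Look for the key in the format "key="
--     search_key = f"{key}="
--     offset = start_params.find(search_key)
--
--     if offset == -1:
--         return None
--
--     # Start after "key="
--     offset += len(search_key)
--
--     # Extract value until we hit a space or ? character
--     value = []
--     for char in start_params[offset:]:
--         if char in (' ', '?'):
--             break
--         value.append(char)
--
--     return ''.join(value) if value else None
-- ===== SOURCE B (Python) =====
-- def parse_start_param(start_params, key):
--     """Find-and-slice re-implementation: cut the value out with find/min instead of a char loop."""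
--     search = key + "="
--     i = start_params.find(search)
--     if i == -1:
--         return None
--     rest = start_params[i + len(search):]
--     sp = rest.find(" ")
--     qm = rest.find("?")
--     end = min(sp if sp != -1 else len(rest), qm if qm != -1 else len(rest))
--     value = rest[:end]
--     return value if value else None
-- ===== Notes on version B (the rewrite author's own statement) =====
-- stated objective: alternative
-- what changed: Replaces the manual character-by-character accumulation loop with delimiter-position lookups (find for ' ' and '?', min, slice) so the value is cut out in one slice instead of built up char by char.
import Mathlib
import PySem

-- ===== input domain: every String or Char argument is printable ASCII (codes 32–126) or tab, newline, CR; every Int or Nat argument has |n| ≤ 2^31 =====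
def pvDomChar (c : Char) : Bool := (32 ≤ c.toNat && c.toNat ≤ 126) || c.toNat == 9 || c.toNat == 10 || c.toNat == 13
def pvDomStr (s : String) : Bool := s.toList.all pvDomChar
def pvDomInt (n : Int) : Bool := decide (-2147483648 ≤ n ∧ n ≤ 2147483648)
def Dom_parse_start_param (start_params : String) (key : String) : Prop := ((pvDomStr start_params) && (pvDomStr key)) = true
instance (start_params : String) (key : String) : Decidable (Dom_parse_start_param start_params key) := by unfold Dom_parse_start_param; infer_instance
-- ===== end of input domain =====

-- B replaces A's character-accumulation loop with delimiter-position lookups and a single slice (objective: alternative, same cost).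

-- ===== PORT A =====
-- A's 'for char in start_params[offset:]: if char in (' ','?'): break; value.append(char)' loop, with its accumulator.
def pvLoopA : List Char → List Char → List Char
  | [], acc => acc
  | c :: rest, acc => if c = ' ' ∨ c = '?' then acc else pvLoopA rest (acc ++ [c])

def parse_start_param (start_params : String) (key : String) : Option String :=
  if start_params.toList = [] then none
  else
    let search_key := key.toList ++ ['=']         -- f"{key}="
    let offset := PySem.Chars.find start_params.toList search_key
    if offset = -1 then none
    else
      let offset2 := offset + search_key.length
      let value := pvLoopA (PySem.List.slice start_params.toList (some offset2) none) []
      if value ≠ [] then some (String.ofList value) else none   -- ''.join(value) if value else None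

-- ===== PORT B =====
def parse_start_param_alt (start_params : String) (key : String) : Option String :=
  let search := key.toList ++ ['=']
  let i := PySem.Chars.find start_params.toList search
  if i = -1 then none
  else
    let rest := PySem.List.slice start_params.toList (some (i + search.length)) none
    let sp := PySem.Chars.find rest [' ']
    let qm := PySem.Chars.find rest ['?']
    let e : Int := min (if sp ≠ -1 then sp else (rest.length : Int))
                       (if qm ≠ -1 then qm else (rest.length : Int))
    let value := PySem.List.slice rest none (some e)
    if value ≠ [] then some (String.ofList value) else none

-- ===== PRECONDITION & SPEC =====
def Spec_parse_start_param (start_params : String) (key : String) (out : Option String) : Prop := out = parse_start_param_alt start_params key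
instance (start_params : String) (key : String) (out : Option String) : Decidable (Spec_parse_start_param start_params key out) := by unfold Spec_parse_start_param; infer_instance

-- ===== CLAIM (what is proved, stated in full; the proofs are below) =====
def Claim_equal_parse_start_param : Prop := ∀ (start_params : String) (key : String), Dom_parse_start_param start_params key → Spec_parse_start_param start_params key (parse_start_param start_params key)

-- ===== LEMMAS AND PROOFS =====

-- A's loop is takeWhile of the non-terminator predicate.
theorem pvLoopA_eq (l acc : List Char) :
    pvLoopA l acc = acc ++ l.takeWhile (fun c => !(c == ' ' || c == '?')) := by
  induction l generalizing acc with
  | nil => simp [pvLoopA]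
  | cons c rest ih =>
    by_cases h : c = ' ' ∨ c = '?'
    · simp [pvLoopA, h, List.takeWhile_cons]
      rcases h with h | h <;> simp [h]
    · simp only [not_or] at h
      simp [pvLoopA, h, ih]

-- [c] is a prefix of l iff l starts with c.
theorem singleton_prefix_iff (c : Char) (l : List Char) :
    [c] <+: l ↔ l.head? = some c := by
  cases l with
  | nil => simp
  | cons a t => simp [List.cons_prefix_iff, eq_comm]

-- PySem's find of a single character, completed with the length on failure, is findIdx.
theorem charFind_eq_findIdx (rest : List Char) (c : Char) :
    (if PySem.Chars.find rest [c] ≠ -1 then PySem.Chars.find rest [c] else (rest.length : Int))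
      = (rest.findIdx (· == c) : Int) := by
  by_cases h : PySem.Chars.find rest [c] = -1
  · simp only [h, ne_eq, not_true_eq_false, if_false]
    rw [PySem.Chars.find_eq_neg_one_iff] at h
    have hnotmem : c ∉ rest := fun hm => h ((List.singleton_infix_iff c rest).mpr hm)
    rw [List.findIdx_eq_length_of_false (by intro x hx; simp; rintro rfl; exact hnotmem hx)]
  · simp only [ne_eq, h, not_false_eq_true, if_true]
    have h0 : (0 : Int) ≤ (rest.length : Int) := by positivity
    have hspec := PySem.Chars.findFrom_natCast_spec rest [c] 0 (by omega)
      (by simpa [PySem.Chars.findFrom_zero] using h)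
    simp only [Nat.cast_zero, PySem.Chars.findFrom_zero] at hspec
    obtain ⟨hle, hpre, hmin⟩ := hspec
    set n := PySem.Chars.find rest [c] with hn
    have hnlen : n ≤ (rest.length : Int) := PySem.Chars.find_le_length rest [c]
    rw [singleton_prefix_iff] at hpre
    have hlt : n.toNat < rest.length := by
      by_contra hge
      have : rest.drop n.toNat = [] := List.drop_eq_nil_of_le (by omega)
      simp [this] at hpre
    have hget : rest[n.toNat] = c := by
      rw [List.head?_drop, List.getElem?_eq_getElem hlt] at hpre
      exact Option.some.inj hpre
    have hidx : rest.findIdx (· == c) = n.toNat := by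
      rw [List.findIdx_eq hlt]
      refine ⟨by simp [hget], ?_⟩
      intro j hj
      have hjlt : j < rest.length := by omega
      have h2 := hmin j (Nat.zero_le _) hj
      rw [singleton_prefix_iff, List.head?_drop, List.getElem?_eq_getElem hjlt] at h2
      simp only [Option.some.injEq] at h2
      simp [h2]
    rw [hidx]
    omega

-- take up to the first index where p holds is takeWhile of (not p).
theorem take_findIdx_eq_takeWhile (p : Char → Bool) (l : List Char) :
    l.take (l.findIdx p) = l.takeWhile (fun c => !p c) := by
  induction l with
  | nil => simp
  | cons c t ih =>
    by_cases h : p c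
    · simp [List.findIdx_cons, h, List.takeWhile_cons]
    · simp [List.findIdx_cons, h, List.takeWhile_cons, ih]

-- the value B slices out equals the value A's loop accumulates
theorem value_eq (rest : List Char) :
    PySem.List.slice rest none
        (some (min (if PySem.Chars.find rest [' '] ≠ -1 then PySem.Chars.find rest [' '] else (rest.length : Int))
                   (if PySem.Chars.find rest ['?'] ≠ -1 then PySem.Chars.find rest ['?'] else (rest.length : Int))))
      = pvLoopA rest [] := by
  rw [charFind_eq_findIdx rest ' ', charFind_eq_findIdx rest '?', pvLoopA_eq]
  have : min ((rest.findIdx (· == ' ') : Int)) ((rest.findIdx (· == '?') : Int))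
      = ((min (rest.findIdx (· == ' ')) (rest.findIdx (· == '?')) : Nat) : Int) := by
    omega
  rw [this, PySem.List.slice_to]
  simp [take_findIdx_eq_takeWhile]
  positivity

-- ===== VERDICT (by name: the statement is the Claim_ definition above) =====
theorem parse_start_param_spec : Claim_equal_parse_start_param := by
  intro sp key _
  unfold Spec_parse_start_param parse_start_param parse_start_param_alt
  by_cases hemp : sp.toList = []
  · have hneg : PySem.Chars.find sp.toList (key.toList ++ ['=']) = -1 := by
      rw [PySem.Chars.find_eq_neg_one_iff, hemp]
      intro h
      have := h.sublist.length_le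
      simp at this
    rw [hemp] at hneg
    simp [hemp, hneg]
  · simp only [hemp, if_false]
    by_cases hf : PySem.Chars.find sp.toList (key.toList ++ ['=']) = -1
    · simp [hf]
    · simp only [hf, if_false]
      rw [value_eq]
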